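-- pv_equiv track=rewrite | github.com/bcloutier412/strands-solver | FindingCyclesOfLengthX.py | find_x_length_cycles
-- ===== SOURCE A (Python) =====
-- def find_x_length_cycles(graph, x):
--     all_cycles = []
--
--     def dfs(start, current, depth, path, visited):
--         if depth == x:
--             if start in graph[current]:
--                 path += [start]
--                 all_cycles.append(path)
--             return
--
--         for neighbor in graph[current]:
--             if neighbor not in visited:
--                 visited.add(neighbor)
--                 dfs(start, neighbor, depth + 1, path + [neighbor], visited)
--                 visited.remove(neighbor)
--
--     for vertex in graph:
--         dfs(vertex, vertex, 1, [vertex], set({vertex}))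
--
--     return all_cycles
-- ===== SOURCE B (Python) =====
-- def find_x_length_cycles(graph, x):
--     # Level-synchronous path extension instead of recursive DFS; "visited" is just the path.
--     cycles = []
--     if x < 1:
--         return cycles
--     for start in graph:
--         paths = [[start]]
--         for _ in range(x - 1):
--             if not paths:
--                 break
--             paths = [p + [n] for p in paths for n in graph[p[-1]] if n not in p]
--         for p in paths:
--             if start in graph[p[-1]]:
--                 cycles.append(p + [start])
--     return cycles
-- ===== Notes on version B (the rewrite author's own statement) =====
-- stated objective: alternative
-- what changed: The recursive backtracking DFS with a mutable visited set is replaced by a level-synchronous breadth-style iteration: for each start, the list of simple paths is extended x-1 times by a comprehension (membership tested against the path itself, the visited set is gone), then paths that close back to the start are emitted.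
import Mathlib
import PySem

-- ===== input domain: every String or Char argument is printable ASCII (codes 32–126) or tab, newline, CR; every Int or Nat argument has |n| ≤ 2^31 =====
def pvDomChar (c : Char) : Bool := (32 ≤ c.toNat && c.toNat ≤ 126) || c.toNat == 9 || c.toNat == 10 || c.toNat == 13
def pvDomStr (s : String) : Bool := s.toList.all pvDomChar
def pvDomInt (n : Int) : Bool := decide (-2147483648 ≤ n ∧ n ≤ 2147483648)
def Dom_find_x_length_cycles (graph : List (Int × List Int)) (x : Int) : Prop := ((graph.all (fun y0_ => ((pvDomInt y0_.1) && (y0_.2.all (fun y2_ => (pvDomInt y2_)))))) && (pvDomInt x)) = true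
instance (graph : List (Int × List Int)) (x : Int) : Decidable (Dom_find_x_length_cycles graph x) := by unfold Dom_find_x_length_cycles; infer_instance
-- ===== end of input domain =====

-- B replaces the recursive backtracking DFS by a level-synchronous path-extension loop (alternative
-- decomposition, same cost); equivalence is about the return value only.

-- ===== PORT A =====
-- graph[current]: dict lookup; a missing key raises KeyError in Python — excluded by Pre_ below.
def pvAdj (graph : List (Int × List Int)) (c : Int) : List Int :=
  PySem.Dict.getD (PySem.Dict.mk graph) c []

-- dfs of A; fuel makes the recursion structural (under Pre_ the path is a nodup list of keys, so
-- graph.length + 1 units never run out).  Python mutates `visited` (add, recurse, remove); since the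
-- recursive call restores it exactly, passing `visited.add n` down and keeping `visited` in the loop
-- is the same computation.
def pvDfsA (graph : List (Int × List Int)) (x start : Int) :
    Nat → Int → Int → List Int → PySem.Set Int → List (List Int) → List (List Int)
  | 0, _, _, _, _, acc => acc
  | fuel+1, current, depth, path, visited, acc =>
    if depth = x then
      if start ∈ pvAdj graph current then acc ++ [path ++ [start]] else acc
    else
      (pvAdj graph current).foldl
        (fun a n =>
          if n ∈ visited then a
          else pvDfsA graph x start fuel n (depth + 1) (path ++ [n]) (PySem.Set.add visited n) a)
        acc

def find_x_length_cycles (graph : List (Int × List Int)) (x : Int) : List (List Int) :=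
  graph.foldl
    (fun acc vp =>
      pvDfsA graph x vp.1 (graph.length + 1) vp.1 1 [vp.1] (PySem.Set.ofList [vp.1]) acc)
    []

-- ===== PORT B =====
-- paths = [p + [n] for p in paths for n in graph[p[-1]] if n not in p]
def pvStepB (graph : List (Int × List Int)) (paths : List (List Int)) : List (List Int) :=
  paths.flatMap (fun p =>
    ((pvAdj graph (p.getLastD 0)).filter (fun n => decide (n ∉ p))).map (fun n => p ++ [n]))

-- the `for _ in range(x-1)` loop with its `if not paths: break`
def pvLevelB (graph : List (Int × List Int)) : Nat → List (List Int) → List (List Int)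
  | 0, paths => paths
  | k+1, paths => if paths = [] then paths else pvLevelB graph k (pvStepB graph paths)

-- the emission loop: for p in paths: if start in graph[p[-1]]: cycles.append(p + [start])
def pvEmitB (graph : List (Int × List Int)) (s : Int) (paths cycles : List (List Int)) :
    List (List Int) :=
  paths.foldl (fun a p => if s ∈ pvAdj graph (p.getLastD 0) then a ++ [p ++ [s]] else a) cycles

def find_x_length_cycles_alt (graph : List (Int × List Int)) (x : Int) : List (List Int) :=
  if x < 1 then []
  else
    graph.foldl
      (fun cycles vp => pvEmitB graph vp.1 (pvLevelB graph (x - 1).toNat [[vp.1]]) cycles)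
      []

-- ===== PRECONDITION & SPEC =====
-- Pre_ excludes (a superset of) the inputs on which Python A raises KeyError: an adjacency list
-- mentioning a vertex that is not a key can be looked up once the search recurses, so it is allowed
-- only when x = 1 (no recursion ever happens then).
def Pre_find_x_length_cycles (graph : List (Int × List Int)) (x : Int) : Prop :=
  x = 1 ∨ ∀ p ∈ graph, ∀ n ∈ p.2, n ∈ graph.map Prod.fst
instance (graph : List (Int × List Int)) (x : Int) : Decidable (Pre_find_x_length_cycles graph x) := by
  unfold Pre_find_x_length_cycles; infer_instance

def pvWitness_find_x_length_cycles : (List (Int × List Int)) × Int :=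
  ([(1, [2, 3]), (2, [3]), (3, [1])], 3)

def Spec_find_x_length_cycles (graph : List (Int × List Int)) (x : Int) (out : List (List Int)) : Prop := out = find_x_length_cycles_alt graph x
instance (graph : List (Int × List Int)) (x : Int) (out : List (List Int)) : Decidable (Spec_find_x_length_cycles graph x out) := by unfold Spec_find_x_length_cycles; infer_instance

-- ===== CLAIM (what is proved, stated in full; the proofs are below) =====
def Claim_equal_find_x_length_cycles : Prop := ∀ (graph : List (Int × List Int)) (x : Int), Dom_find_x_length_cycles graph x → Pre_find_x_length_cycles graph x → Spec_find_x_length_cycles graph x (find_x_length_cycles graph x)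

-- ===== LEMMAS AND PROOFS =====

-- the common mathematical shape: all cycles completing a given simple path in k more steps
def pvSpec (graph : List (Int × List Int)) (s : Int) : Nat → List Int → List (List Int)
  | 0, p => if s ∈ pvAdj graph (p.getLastD 0) then [p ++ [s]] else []
  | k+1, p =>
      (((pvAdj graph (p.getLastD 0)).filter (fun n => decide (n ∉ p))).map (fun n => p ++ [n])).flatMap
        (pvSpec graph s k)

theorem pvSpec_zero (graph : List (Int × List Int)) (s : Int) (l : List (List Int)) :
    l.flatMap (pvSpec graph s 0)
      = (l.filter (fun p => decide (s ∈ pvAdj graph (p.getLastD 0)))).map (fun p => p ++ [s]) := by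
  induction l with
  | nil => rfl
  | cons p t ih =>
    rw [List.flatMap_cons, ih]
    by_cases h : s ∈ pvAdj graph (p.getLast?.getD 0) <;>
      simp [pvSpec, List.getLastD_eq_getLast?, h, List.filter_cons]

theorem pvSpec_succ (graph : List (Int × List Int)) (s : Int) (k : Nat) (l : List (List Int)) :
    l.flatMap (pvSpec graph s (k + 1)) = (pvStepB graph l).flatMap (pvSpec graph s k) := by
  induction l with
  | nil => rfl
  | cons p t ih =>
    simp only [pvStepB, List.flatMap_cons, List.flatMap_append] at *
    rw [ih]
    rfl

-- B side: emitting after k extension rounds is flatMapping pvSpec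
theorem pvEmit_level (graph : List (Int × List Int)) (s : Int) (k : Nat) :
    ∀ (paths cycles : List (List Int)),
      pvEmitB graph s (pvLevelB graph k paths) cycles = cycles ++ paths.flatMap (pvSpec graph s k) := by
  induction k with
  | zero =>
    intro paths cycles
    unfold pvLevelB pvEmitB
    rw [PySem.List.foldl_append_ite (p := fun p => s ∈ pvAdj graph (p.getLastD 0))
      (f := fun p => p ++ [s]), pvSpec_zero]
  | succ k ih =>
    intro paths cycles
    by_cases h : paths = []
    · simp [h, pvLevelB, pvEmitB]
    · simp only [pvLevelB, if_neg h]
      rw [ih, pvSpec_succ]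

-- A side, x < 1: depth starts at 1 and only grows, so depth == x never fires and nothing is appended
theorem pvDfsA_neg (graph : List (Int × List Int)) (x start : Int) (hx : x < 1) :
    ∀ (fuel : Nat) (current depth : Int) (path : List Int) (visited : PySem.Set Int)
      (acc : List (List Int)), 1 ≤ depth →
      pvDfsA graph x start fuel current depth path visited acc = acc := by
  intro fuel
  induction fuel with
  | zero => intro current depth path visited acc _; rfl
  | succ fuel ih =>
    intro current depth path visited acc hd
    have hne : ¬ depth = x := by omega
    simp only [pvDfsA, if_neg hne]
    rw [PySem.List.foldl_congr_mem (g := fun a _ => a)]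
    · exact PySem.List.foldl_ignore _ _
    · intro a n _
      by_cases h : n ∈ visited
      · rw [if_pos h]
      · rw [if_neg h]; exact ih _ _ _ _ _ (by omega)

theorem pvLen_le_dedup {p keys : List Int} (hnd : p.Nodup) (hsub : ∀ a ∈ p, a ∈ keys) :
    p.length ≤ keys.dedup.length := by
  calc p.length = p.toFinset.card := (List.toFinset_card_of_nodup hnd).symm
    _ ≤ keys.toFinset.card := Finset.card_le_card (fun a ha => by
        simp only [List.mem_toFinset] at *; exact hsub a ha)
    _ = keys.dedup.length := List.card_toFinset keys

-- A side, main lemma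
theorem pvDfsA_spec (graph : List (Int × List Int)) (x s : Int)
    (hpre : ∀ p ∈ graph, ∀ n ∈ p.2, n ∈ graph.map Prod.fst) :
    ∀ (fuel : Nat) (p : List Int) (depth : Int) (visited : PySem.Set Int) (acc : List (List Int)),
      p ≠ [] → p.Nodup → (∀ a ∈ p, a ∈ graph.map Prod.fst) →
      (∀ a : Int, a ∈ visited ↔ a ∈ p) →
      1 ≤ depth → depth ≤ x →
      (graph.map Prod.fst).dedup.length - p.length < fuel →
      pvDfsA graph x s fuel (p.getLastD 0) depth p visited acc
        = acc ++ pvSpec graph s (x - depth).toNat p := by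
  intro fuel
  induction fuel with
  | zero =>
    intro p depth visited acc hne hnd hsub _ _ _ hfuel
    exact absurd hfuel (by omega)
  | succ fuel ih =>
    intro p depth visited acc hne hnd hsub hvis hd1 hdx hfuel
    by_cases hdepth : depth = x
    · have h0 : (x - depth).toNat = 0 := by omega
      simp only [pvDfsA, if_pos hdepth, h0, pvSpec]
      split_ifs <;> simp
    · have hlt : depth < x := lt_of_le_of_ne hdx hdepth
      have hk : (x - depth).toNat = (x - (depth + 1)).toNat + 1 := by omega
      simp only [pvDfsA, if_neg hdepth, hk, pvSpec]
      -- neighbours of the current vertex are keys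
      have hnbr : ∀ n ∈ pvAdj graph (p.getLastD 0), n ∈ graph.map Prod.fst := by
        intro n hn
        rcases hget : PySem.Dict.get? (PySem.Dict.mk graph) (p.getLastD 0) with _ | ns
        · rw [pvAdj, PySem.Dict.getD_eq_get?_getD, hget] at hn
          cases hn
        · rw [pvAdj, PySem.Dict.getD_eq_get?_getD, hget] at hn
          simp only [Option.getD_some] at hn
          have hmem : (p.getLastD 0, ns) ∈ graph :=
            PySem.Dict.mem_items_of_get?_eq_some _ hget
          exact hpre _ hmem n hn
      rw [PySem.List.foldl_congr_mem
          (g := fun a n => a ++ (if n ∈ p then [] else pvSpec graph s (x - (depth + 1)).toNat (p ++ [n])))]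
      · rw [PySem.List.foldl_append_eq_flatMap]
        congr 1
        rw [List.flatMap_map]
        induction pvAdj graph (p.getLastD 0) with
        | nil => simp
        | cons n t iht =>
          by_cases h : n ∈ p
          · simp only [List.flatMap_cons, List.filter_cons, decide_eq_true_eq, if_pos h]
            simpa [h] using iht
          · simp only [List.flatMap_cons, List.filter_cons]
            simpa [h, Function.comp] using iht
      · intro a n hn
        by_cases h : n ∈ p
        · rw [if_pos ((hvis n).mpr h), if_pos h, List.append_nil]
        · have hnv : ¬ n ∈ visited := fun hc => h ((hvis n).mp hc)
          have hnk : n ∈ graph.map Prod.fst := hnbr n hn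
          have hnd' : (p ++ [n]).Nodup := by
            simp [List.nodup_append, hnd]
            intro a ha hc
            subst hc
            exact h ha
          have hsub' : ∀ a ∈ p ++ [n], a ∈ graph.map Prod.fst := by
            intro a ha
            rcases List.mem_append.mp ha with h1 | h1
            · exact hsub a h1
            · simp at h1; subst h1; exact hnk
          have hlen : p.length + 1 ≤ (graph.map Prod.fst).dedup.length :=
            by simpa using pvLen_le_dedup hnd' hsub'
          have hvis' : ∀ a : Int, a ∈ PySem.Set.add visited n ↔ a ∈ p ++ [n] := by
            intro a
            rw [PySem.Set.mem_add]
            simp [hvis a, or_comm]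
          have hrec := ih (p ++ [n]) (depth + 1) (PySem.Set.add visited n) a
            (by simp) hnd' hsub' hvis' (by omega) (by omega) (by simp; omega)
          rw [List.getLastD_concat] at hrec
          rw [if_neg hnv, hrec, if_neg h]

-- ===== VERDICT (by name: the statement is the Claim_ definition above) =====
theorem find_x_length_cycles_spec : Claim_equal_find_x_length_cycles := by
  intro graph x _ hpre
  unfold Spec_find_x_length_cycles
  by_cases hx : x < 1
  · unfold find_x_length_cycles find_x_length_cycles_alt
    rw [if_pos hx]
    rw [PySem.List.foldl_congr_mem (g := fun a _ => a)]
    · exact PySem.List.foldl_ignore _ _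
    · intro a vp _
      exact pvDfsA_neg graph x vp.1 hx _ _ _ _ _ _ (le_refl 1)
  · have hx1 : 1 ≤ x := by omega
    rcases hpre with hpre | hpre
    · subst hpre
      unfold find_x_length_cycles find_x_length_cycles_alt
      rw [if_neg (by omega)]
      apply PySem.List.foldl_congr_mem
      intro acc vp hvp
      show pvDfsA graph 1 vp.1 (graph.length + 1) vp.1 1 [vp.1] (PySem.Set.ofList [vp.1]) acc
        = pvEmitB graph vp.1 (pvLevelB graph ((1 : Int) - 1).toNat [[vp.1]]) acc
      simp only [pvDfsA]
      rfl
    · unfold find_x_length_cycles find_x_length_cycles_alt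
      rw [if_neg (by omega)]
      apply PySem.List.foldl_congr_mem
      intro acc vp hvp
      have hkey : vp.1 ∈ graph.map Prod.fst := List.mem_map_of_mem hvp
      have hA := pvDfsA_spec graph x vp.1 hpre (graph.length + 1) [vp.1] 1
        (PySem.Set.ofList [vp.1]) acc (by simp) (by simp) (by simpa using hkey)
        (by intro a; simp [PySem.Set.mem_ofList]) (le_refl 1) hx1
        (by
          have h2 : (graph.map Prod.fst).dedup.length ≤ graph.length := by
            simpa using (List.dedup_sublist (graph.map Prod.fst)).length_le
          omega)
      rw [show ([vp.1] : List Int).getLastD 0 = vp.1 from rfl] at hA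
      rw [pvEmit_level, hA]
      simp
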